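-- pv_equiv track=rewrite | github.com/Nirebl/Automatic_compression_of_CNN | NCNN_Compression/xtrim/yolo/pruning_adapters.py | _safe_num_heads
-- ===== SOURCE A (Python) =====
-- from typing import Any, Dict, List, Optional, Sequence, Tuple
--
-- def _safe_num_heads(dim: int, preferred_heads: Optional[int] = None, min_head_dim: int = 8) -> int:
--     """
--     Safely choose a valid number of heads for Attention(dim, num_heads=...).
--
--     Правила:
--     - num_heads >= 1
--     - dim % num_heads == 0
--     - стараемся сохранить число голов не больше старого preferred_heads
--     - стараемся не делать слишком маленький head_dim
--     """
--     dim = int(dim)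
--     if dim <= 0:
--         return 1
--
--     if preferred_heads is None:
--         preferred_heads = max(1, dim // 64)
--
--     preferred_heads = max(1, min(int(preferred_heads), dim))
--
--     # Сначала ищем делитель, где head_dim не слишком маленький
--     for h in range(preferred_heads, 0, -1):
--         if dim % h == 0 and (dim // h) >= int(min_head_dim):
--             return h
--
--     # Потом любой делитель
--     for h in range(preferred_heads, 0, -1):
--         if dim % h == 0:
--             return h
--
--     return 1
-- ===== SOURCE B (Python) =====
-- def _safe_num_heads(dim, preferred_heads=None, min_head_dim=8):
--     """Pick a valid head count by enumerating divisors of dim up to sqrt(dim)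
--     (O(sqrt dim) instead of A's O(dim) countdown scan)."""
--     dim = int(dim)
--     if dim <= 0:
--         return 1
--     if preferred_heads is None:
--         preferred_heads = max(1, dim // 64)
--     p = max(1, min(int(preferred_heads), dim))
--     m = int(min_head_dim)
--     best_ok = 0
--     best_any = 0
--     i = 1
--     while i * i <= dim:
--         if dim % i == 0:
--             for h in (i, dim // i):
--                 if h <= p:
--                     if h > best_any:
--                         best_any = h
--                     if dim // h >= m and h > best_ok:
--                         best_ok = h
--         i += 1
--     return best_ok if best_ok else best_any
-- ===== Notes on version B (the rewrite author's own statement) =====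
-- stated objective: faster
-- what changed: A scans head counts downward from preferred_heads twice (O(dim) trial divisions); B enumerates divisor pairs (i, dim//i) for i up to sqrt(dim) once, tracking the largest candidate <= preferred both with and without the min_head_dim constraint.
import Mathlib
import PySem

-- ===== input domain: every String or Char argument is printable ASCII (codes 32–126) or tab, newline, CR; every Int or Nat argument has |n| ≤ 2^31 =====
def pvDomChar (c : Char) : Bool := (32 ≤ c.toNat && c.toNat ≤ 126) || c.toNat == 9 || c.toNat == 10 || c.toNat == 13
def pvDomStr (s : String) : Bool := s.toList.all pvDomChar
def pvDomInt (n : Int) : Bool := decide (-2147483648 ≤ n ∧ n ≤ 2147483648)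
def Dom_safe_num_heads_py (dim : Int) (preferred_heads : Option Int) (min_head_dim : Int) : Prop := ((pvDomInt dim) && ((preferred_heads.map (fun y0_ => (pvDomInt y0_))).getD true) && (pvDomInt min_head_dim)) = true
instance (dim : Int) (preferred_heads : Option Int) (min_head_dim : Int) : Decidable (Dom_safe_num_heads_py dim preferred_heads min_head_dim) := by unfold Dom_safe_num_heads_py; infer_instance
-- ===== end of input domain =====

-- B replaces A's O(dim) downward scan by an O(sqrt dim) enumeration of divisor pairs, tracking the two maxima in one pass.

-- ===== PORT A =====
-- 'for h in range(p, 0, -1): if Q(h): return h' — countdown, none = fell through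
def pvALoop (Q : Int → Bool) : Nat → Option Int
  | 0 => none
  | n+1 => if Q ((n : Int) + 1) then some ((n : Int) + 1) else pvALoop Q n

def safe_num_heads_py (dim : Int) (preferred_heads : Option Int) (min_head_dim : Int) : Int :=
  if dim ≤ 0 then 1
  else
    let pref := preferred_heads.getD (max 1 (PySem.Int.floordiv dim 64))
    let p := max 1 (min pref dim)
    match pvALoop (fun h => PySem.Int.mod dim h == 0 && decide (min_head_dim ≤ PySem.Int.floordiv dim h)) p.toNat with
    | some h => h
    | none =>
      match pvALoop (fun h => PySem.Int.mod dim h == 0) p.toNat with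
      | some h => h
      | none => 1

-- ===== PORT B =====
-- body of 'for h in (i, dim // i): if h <= p: …' for one candidate h
def pvBStep (dim p m ok any_ h : Int) : Int × Int :=
  if h ≤ p then
    let any' := if any_ < h then h else any_
    let ok' := if m ≤ PySem.Int.floordiv dim h ∧ ok < h then h else ok
    (ok', any')
  else (ok, any_)

-- 'while i*i <= dim: …; i += 1' — fuel = dim.toNat always outlasts the loop (i*i > dim once i > dim)
def pvBLoop (dim p m : Int) : Nat → Int → Int → Int → Int × Int
  | 0, _, ok, any_ => (ok, any_)
  | fuel+1, i, ok, any_ =>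
    if i * i ≤ dim then
      if PySem.Int.mod dim i == 0 then
        let s1 := pvBStep dim p m ok any_ i
        let s2 := pvBStep dim p m s1.1 s1.2 (PySem.Int.floordiv dim i)
        pvBLoop dim p m fuel (i + 1) s2.1 s2.2
      else pvBLoop dim p m fuel (i + 1) ok any_
    else (ok, any_)

def safe_num_heads_py_alt (dim : Int) (preferred_heads : Option Int) (min_head_dim : Int) : Int :=
  if dim ≤ 0 then 1
  else
    let pref := preferred_heads.getD (max 1 (PySem.Int.floordiv dim 64))
    let p := max 1 (min pref dim)
    let r := pvBLoop dim p min_head_dim dim.toNat 1 0 0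
    if r.1 == 0 then r.2 else r.1

-- ===== PRECONDITION & SPEC =====
def Spec_safe_num_heads_py (dim : Int) (preferred_heads : Option Int) (min_head_dim : Int) (out : Int) : Prop := out = safe_num_heads_py_alt dim preferred_heads min_head_dim
instance (dim : Int) (preferred_heads : Option Int) (min_head_dim : Int) (out : Int) : Decidable (Spec_safe_num_heads_py dim preferred_heads min_head_dim out) := by unfold Spec_safe_num_heads_py; infer_instance

-- ===== CLAIM (what is proved, stated in full; the proofs are below) =====
def Claim_equal_safe_num_heads_py : Prop := ∀ (dim : Int) (preferred_heads : Option Int) (min_head_dim : Int), Dom_safe_num_heads_py dim preferred_heads min_head_dim → Spec_safe_num_heads_py dim preferred_heads min_head_dim (safe_num_heads_py dim preferred_heads min_head_dim)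

-- ===== LEMMAS AND PROOFS =====

-- h is touched by B's loop when the counter starts at i (dim > 0 throughout)
def pvProc (dim i h : Int) : Prop :=
  0 < h ∧ h ∣ dim ∧ ((i ≤ h ∧ h * h ≤ dim) ∨ (i ≤ dim / h ∧ (dim / h) * (dim / h) ≤ dim))

-- r is the max of seed and all h with Q h
def pvIsMax (Q : Int → Prop) (seed r : Int) : Prop :=
  (r = seed ∨ Q r) ∧ seed ≤ r ∧ ∀ h, Q h → h ≤ r

theorem pvIsMax_congr {Q Q' : Int → Prop} (hq : ∀ x, Q x ↔ Q' x) {s r : Int}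
    (h : pvIsMax Q s r) : pvIsMax Q' s r :=
  ⟨h.1.imp id (fun hr => (hq r).1 hr), h.2.1, fun x hx => h.2.2 x ((hq x).2 hx)⟩

theorem pvALoop_some {Q : Int → Bool} {n : Nat} {k : Int}
    (h : pvALoop Q n = some k) :
    0 < k ∧ k ≤ (n : Int) ∧ Q k = true ∧ ∀ j : Int, k < j → j ≤ (n : Int) → Q j = false := by
  induction n with
  | zero => simp [pvALoop] at h
  | succ n ih =>
    unfold pvALoop at h
    by_cases hq : Q ((n : Int) + 1) = true
    · simp [hq] at h
      subst h
      refine ⟨by omega, by push_cast; omega, hq, fun j hj1 hj2 => ?_⟩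
      push_cast at hj2; omega
    · simp [hq] at h
      obtain ⟨h1, h2, h3, h4⟩ := ih h
      refine ⟨h1, by push_cast; omega, h3, fun j hj1 hj2 => ?_⟩
      push_cast at hj2
      rcases eq_or_lt_of_le hj2 with he | hl
      · subst he; simpa using hq
      · exact h4 j hj1 (by omega)

theorem pvALoop_none {Q : Int → Bool} {n : Nat}
    (h : pvALoop Q n = none) : ∀ j : Int, 0 < j → j ≤ (n : Int) → Q j = false := by
  induction n with
  | zero => intro j hj1 hj2; omega
  | succ n ih =>
    unfold pvALoop at h
    by_cases hq : Q ((n : Int) + 1) = true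
    · simp [hq] at h
    · simp [hq] at h
      intro j hj1 hj2
      push_cast at hj2
      rcases eq_or_lt_of_le hj2 with he | hl
      · subst he; simpa using hq
      · exact ih h j hj1 (by omega)

-- d/(d/h) = h for a positive divisor of a positive d
theorem pvDivDiv {d h : Int} (hd : 0 < d) (hh : 0 < h) (hdvd : h ∣ d) :
    d / (d / h) = h := by
  obtain ⟨c, hc⟩ := hdvd
  subst hc
  rw [Int.mul_ediv_cancel_left _ (by omega)]
  have hc : 0 < c := by nlinarith
  rw [Int.mul_ediv_cancel _ (by omega)]

theorem pvDivPos {d h : Int} (hd : 0 < d) (hh : 0 < h) (hdvd : h ∣ d) : 0 < d / h := by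
  obtain ⟨c, hc⟩ := hdvd
  subst hc
  rw [Int.mul_ediv_cancel_left _ (by omega)]
  nlinarith

theorem pvMulDiv {d h : Int} (hh : 0 < h) (hdvd : h ∣ d) : h * (d / h) = d := by
  obtain ⟨c, hc⟩ := hdvd
  subst hc
  rw [Int.mul_ediv_cancel_left _ (by omega)]

-- no h is touched once the counter has passed sqrt(dim)
theorem pvProc_empty {dim i h : Int} (hi : 1 ≤ i) (hgt : ¬ i * i ≤ dim) :
    ¬ pvProc dim i h := by
  rintro ⟨h1, h2, h3 | h3⟩
  · nlinarith [h3.1, h3.2]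
  · nlinarith [h3.1, h3.2]

theorem pvProc_one {dim h : Int} (hd : 0 < dim) :
    pvProc dim 1 h ↔ 0 < h ∧ h ∣ dim := by
  constructor
  · rintro ⟨h1, h2, _⟩; exact ⟨h1, h2⟩
  · rintro ⟨h1, h2⟩
    refine ⟨h1, h2, ?_⟩
    have hc : 0 < dim / h := pvDivPos hd h1 h2
    have hm : h * (dim / h) = dim := pvMulDiv h1 h2
    rcases le_total h (dim / h) with hle | hle
    · exact Or.inl ⟨h1, by nlinarith⟩
    · exact Or.inr ⟨hc, by nlinarith⟩

-- counter step when i does not divide dim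
theorem pvProc_step_ndvd {dim i h : Int} (hi : 1 ≤ i) (hndvd : ¬ i ∣ dim) :
    pvProc dim i h ↔ pvProc dim (i + 1) h := by
  constructor
  · rintro ⟨h1, h2, h3 | h3⟩
    · have hne : h ≠ i := by rintro rfl; exact hndvd h2
      exact ⟨h1, h2, Or.inl ⟨by omega, h3.2⟩⟩
    · have hne : dim / h ≠ i := by
        intro he
        exact hndvd ⟨h, by rw [← pvMulDiv h1 h2, he]; ring⟩
      exact ⟨h1, h2, Or.inr ⟨by omega, h3.2⟩⟩
  · rintro ⟨h1, h2, h3 | h3⟩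
    · exact ⟨h1, h2, Or.inl ⟨by omega, h3.2⟩⟩
    · exact ⟨h1, h2, Or.inr ⟨by omega, h3.2⟩⟩

-- counter step when i divides dim: the pair {i, dim/i} is processed
theorem pvProc_step_dvd {dim i h : Int} (hd : 0 < dim) (hi : 1 ≤ i) (hsq : i * i ≤ dim)
    (hdvd : i ∣ dim) :
    pvProc dim i h ↔ (h = i ∨ h = dim / i) ∨ pvProc dim (i + 1) h := by
  have hip : (0:Int) < i := by omega
  have hci : 0 < dim / i := pvDivPos hd hip hdvd
  have hmi : i * (dim / i) = dim := pvMulDiv hip hdvd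
  constructor
  · rintro hp
    by_cases hei : h = i
    · exact Or.inl (Or.inl hei)
    by_cases hec : h = dim / i
    · exact Or.inl (Or.inr hec)
    obtain ⟨h1, h2, h3 | h3⟩ := hp
    · exact Or.inr ⟨h1, h2, Or.inl ⟨by omega, h3.2⟩⟩
    · have hne : dim / h ≠ i := by
        intro he
        apply hec
        have := pvDivDiv hd h1 h2
        rw [he] at this
        omega
      exact Or.inr ⟨h1, h2, Or.inr ⟨by omega, h3.2⟩⟩
  · rintro ((rfl | rfl) | hp)
    · exact ⟨hip, hdvd, Or.inl ⟨by omega, hsq⟩⟩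
    · refine ⟨hci, ⟨i, by rw [mul_comm]; exact hmi.symm⟩, Or.inr ?_⟩
      rw [pvDivDiv hd hip hdvd]
      exact ⟨by omega, hsq⟩
    · obtain ⟨h1, h2, h3 | h3⟩ := hp
      · exact ⟨h1, h2, Or.inl ⟨by omega, h3.2⟩⟩
      · exact ⟨h1, h2, Or.inr ⟨by omega, h3.2⟩⟩

-- absorbing one pvBStep into the tracked maximum (ok component)
theorem pvBStep_absorb_ok {dim p m ok any_ h0 r : Int} {Q : Int → Prop}
    (h : pvIsMax Q (pvBStep dim p m ok any_ h0).1 r) :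
    pvIsMax (fun h => (h = h0 ∧ h ≤ p ∧ m ≤ PySem.Int.floordiv dim h) ∨ Q h) ok r := by
  by_cases hp : h0 ≤ p
  · by_cases hc : m ≤ PySem.Int.floordiv dim h0 ∧ ok < h0
    · simp only [pvBStep, if_pos hp, if_pos hc] at h
      obtain ⟨hA, hB, hC⟩ := h
      refine ⟨?_, by omega, ?_⟩
      · rcases hA with he | hq
        · exact Or.inr (Or.inl ⟨he, he ▸ hp, he ▸ hc.1⟩)
        · exact Or.inr (Or.inr hq)
      · rintro x (⟨rfl, _, _⟩ | hq)
        · exact hB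
        · exact hC x hq
    · simp only [pvBStep, if_pos hp, if_neg hc] at h
      obtain ⟨hA, hB, hC⟩ := h
      refine ⟨hA.imp id Or.inr, hB, ?_⟩
      rintro x (⟨rfl, hxp, hxm⟩ | hq)
      · have hnlt : ¬ ok < x := fun hlt => hc ⟨hxm, hlt⟩
        omega
      · exact hC x hq
  · simp only [pvBStep, if_neg hp] at h
    obtain ⟨hA, hB, hC⟩ := h
    refine ⟨hA.imp id Or.inr, hB, ?_⟩
    rintro x (⟨rfl, hxp, _⟩ | hq)
    · omega
    · exact hC x hq

-- absorbing one pvBStep into the tracked maximum (any component)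
theorem pvBStep_absorb_any {dim p m ok any_ h0 r : Int} {Q : Int → Prop}
    (h : pvIsMax Q (pvBStep dim p m ok any_ h0).2 r) :
    pvIsMax (fun h => (h = h0 ∧ h ≤ p) ∨ Q h) any_ r := by
  by_cases hp : h0 ≤ p
  · by_cases hc : any_ < h0
    · simp only [pvBStep, if_pos hp, if_pos hc] at h
      obtain ⟨hA, hB, hC⟩ := h
      refine ⟨?_, by omega, ?_⟩
      · rcases hA with he | hq
        · exact Or.inr (Or.inl ⟨he, he ▸ hp⟩)
        · exact Or.inr (Or.inr hq)
      · rintro x (⟨rfl, _⟩ | hq)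
        · exact hB
        · exact hC x hq
    · simp only [pvBStep, if_pos hp, if_neg hc] at h
      obtain ⟨hA, hB, hC⟩ := h
      refine ⟨hA.imp id Or.inr, hB, ?_⟩
      rintro x (⟨rfl, hxp⟩ | hq)
      · omega
      · exact hC x hq
  · simp only [pvBStep, if_neg hp] at h
    obtain ⟨hA, hB, hC⟩ := h
    refine ⟨hA.imp id Or.inr, hB, ?_⟩
    rintro x (⟨rfl, hxp⟩ | hq)
    · omega
    · exact hC x hq

theorem pvBLoop_spec (dim p m : Int) (hd : 0 < dim) :
    ∀ (fuel : Nat) (i ok any_ : Int), 1 ≤ i → dim < i + (fuel : Int) →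
      pvIsMax (fun h => pvProc dim i h ∧ h ≤ p ∧ m ≤ dim / h) ok
        (pvBLoop dim p m fuel i ok any_).1 ∧
      pvIsMax (fun h => pvProc dim i h ∧ h ≤ p) any_
        (pvBLoop dim p m fuel i ok any_).2 := by
  intro fuel
  induction fuel with
  | zero =>
    intro i ok any_ hi hlt
    push_cast at hlt
    have hempty : ∀ h, ¬ pvProc dim i h := by
      rintro h ⟨h1, h2, h3 | h3⟩
      · have := Int.le_of_dvd hd h2
        omega
      · have hcp := pvDivPos hd h1 h2
        have hmul := pvMulDiv h1 h2
        have hcle : dim / h ≤ dim := by nlinarith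
        omega
    simp only [pvBLoop]
    exact ⟨⟨Or.inl rfl, le_refl _, fun h hq => absurd hq.1 (hempty h)⟩,
           ⟨Or.inl rfl, le_refl _, fun h hq => absurd hq.1 (hempty h)⟩⟩
  | succ fuel ih =>
    intro i ok any_ hi hlt
    push_cast at hlt
    simp only [pvBLoop]
    by_cases hsq : i * i ≤ dim
    · simp only [if_pos hsq]
      have hmodiff : (PySem.Int.mod dim i == 0) = true ↔ i ∣ dim := by
        simp [PySem.Int.mod_eq_zero_iff_dvd]
      by_cases hdvd : i ∣ dim
      · simp only [if_pos (hmodiff.2 hdvd)]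
        have hip : (0:Int) < i := by omega
        have hcp : 0 < dim / i := pvDivPos hd hip hdvd
        have hfd : PySem.Int.floordiv dim i = dim / i := PySem.Int.floordiv_eq_ediv_of_pos hip
        have hfdpos : 0 < PySem.Int.floordiv dim i := by rw [hfd]; exact hcp
        obtain ⟨ihok, ihany⟩ := ih (i + 1)
          (pvBStep dim p m (pvBStep dim p m ok any_ i).1 (pvBStep dim p m ok any_ i).2
            (PySem.Int.floordiv dim i)).1
          (pvBStep dim p m (pvBStep dim p m ok any_ i).1 (pvBStep dim p m ok any_ i).2
            (PySem.Int.floordiv dim i)).2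
          (by omega) (by omega)
        constructor
        · have h2 := pvBStep_absorb_ok ihok
          have h1 := pvBStep_absorb_ok h2
          refine pvIsMax_congr (fun x => ?_) h1
          rw [pvProc_step_dvd hd hi hsq hdvd]
          constructor
          · rintro (⟨rfl, hxp, hxm⟩ | (⟨rfl, hxp, hxm⟩ | ⟨hpr, hxp, hxm⟩))
            · exact ⟨Or.inl (Or.inl rfl), hxp,
                by rwa [PySem.Int.floordiv_eq_ediv_of_pos hip] at hxm⟩
            · exact ⟨Or.inl (Or.inr hfd), hxp,
                by rwa [PySem.Int.floordiv_eq_ediv_of_pos hfdpos] at hxm⟩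
            · exact ⟨Or.inr hpr, hxp, hxm⟩
          · rintro ⟨(rfl | rfl) | hpr, hxp, hxm⟩
            · exact Or.inl ⟨rfl, hxp, by rwa [PySem.Int.floordiv_eq_ediv_of_pos hip]⟩
            · exact Or.inr (Or.inl ⟨hfd.symm, hxp,
                by rwa [PySem.Int.floordiv_eq_ediv_of_pos hcp]⟩)
            · exact Or.inr (Or.inr ⟨hpr, hxp, hxm⟩)
        · have h2 := pvBStep_absorb_any ihany
          have h1 := pvBStep_absorb_any h2
          refine pvIsMax_congr (fun x => ?_) h1
          rw [pvProc_step_dvd hd hi hsq hdvd]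
          constructor
          · rintro (⟨rfl, hxp⟩ | (⟨rfl, hxp⟩ | ⟨hpr, hxp⟩))
            · exact ⟨Or.inl (Or.inl rfl), hxp⟩
            · exact ⟨Or.inl (Or.inr hfd), hxp⟩
            · exact ⟨Or.inr hpr, hxp⟩
          · rintro ⟨(rfl | rfl) | hpr, hxp⟩
            · exact Or.inl ⟨rfl, hxp⟩
            · exact Or.inr (Or.inl ⟨hfd.symm, hxp⟩)
            · exact Or.inr (Or.inr ⟨hpr, hxp⟩)
      · simp only [if_neg (fun hh => hdvd (hmodiff.1 hh))]
        obtain ⟨ihok, ihany⟩ := ih (i + 1) ok any_ (by omega) (by omega)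
        constructor
        · refine pvIsMax_congr (fun x => ?_) ihok
          rw [pvProc_step_ndvd hi hdvd]
        · refine pvIsMax_congr (fun x => ?_) ihany
          rw [pvProc_step_ndvd hi hdvd]
    · simp only [if_neg hsq]
      exact ⟨⟨Or.inl rfl, le_refl _, fun h hq => absurd hq.1 (pvProc_empty hi hsq)⟩,
             ⟨Or.inl rfl, le_refl _, fun h hq => absurd hq.1 (pvProc_empty hi hsq)⟩⟩

-- ===== VERDICT (by name: the statement is the Claim_ definition above) =====
theorem safe_num_heads_py_spec : Claim_equal_safe_num_heads_py := by
  intro dim pref0 m _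
  unfold Spec_safe_num_heads_py safe_num_heads_py safe_num_heads_py_alt
  by_cases hd : dim ≤ 0
  · simp [hd]
  · simp only [if_neg hd]
    have hdpos : 0 < dim := by omega
    set p := max 1 (min (pref0.getD (max 1 (PySem.Int.floordiv dim 64))) dim) with hp
    have hp1 : 1 ≤ p := le_max_left _ _
    have hpd : p ≤ dim := by omega
    have hpn : ((p.toNat : Int)) = p := Int.toNat_of_nonneg (by omega)
    obtain ⟨hok, hany⟩ := pvBLoop_spec dim p m hdpos dim.toNat 1 0 0 (by omega) (by omega)
    obtain ⟨hokA, hokB, hokC⟩ := hok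
    obtain ⟨hanyA, hanyB, hanyC⟩ := hany
    cases hA : pvALoop
        (fun h => PySem.Int.mod dim h == 0 && decide (m ≤ PySem.Int.floordiv dim h)) p.toNat with
    | some k =>
      obtain ⟨hk0, hkle, hkQ, hkmax⟩ := pvALoop_some hA
      rw [hpn] at hkle
      simp only [Bool.and_eq_true, beq_iff_eq, decide_eq_true_eq] at hkQ
      have hkQ' : k ∣ dim ∧ m ≤ dim / k :=
        ⟨(PySem.Int.mod_eq_zero_iff_dvd dim k).1 hkQ.1,
         by rw [← PySem.Int.floordiv_eq_ediv_of_pos hk0]; exact hkQ.2⟩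
      have hkr : k ≤ (pvBLoop dim p m dim.toNat 1 0 0).1 :=
        hokC k ⟨(pvProc_one hdpos).2 ⟨hk0, hkQ'.1⟩, hkle, hkQ'.2⟩
      have hr1Q : pvProc dim 1 (pvBLoop dim p m dim.toNat 1 0 0).1 ∧
          (pvBLoop dim p m dim.toNat 1 0 0).1 ≤ p ∧
          m ≤ dim / (pvBLoop dim p m dim.toNat 1 0 0).1 := by
        rcases hokA with he | hq
        · exact absurd he (by omega)
        · exact hq
      have hr1pos : 0 < (pvBLoop dim p m dim.toNat 1 0 0).1 := ((pvProc_one hdpos).1 hr1Q.1).1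
      have hnlt : ¬ k < (pvBLoop dim p m dim.toNat 1 0 0).1 := by
        intro hlt
        have hfalse := hkmax _ hlt (by rw [hpn]; exact hr1Q.2.1)
        have h1 : PySem.Int.mod dim (pvBLoop dim p m dim.toNat 1 0 0).1 = 0 :=
          (PySem.Int.mod_eq_zero_iff_dvd dim _).2 ((pvProc_one hdpos).1 hr1Q.1).2
        have h2 : m ≤ PySem.Int.floordiv dim (pvBLoop dim p m dim.toNat 1 0 0).1 := by
          rw [PySem.Int.floordiv_eq_ediv_of_pos hr1pos]; exact hr1Q.2.2
        simp [h1, h2] at hfalse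
      have heq : (pvBLoop dim p m dim.toNat 1 0 0).1 = k := by omega
      have hkne : (k == 0) = false := by simpa using (show k ≠ 0 by omega)
      simp [heq, hkne]
    | none =>
      have hno := pvALoop_none hA
      have hr1 : (pvBLoop dim p m dim.toNat 1 0 0).1 = 0 := by
        rcases hokA with he | hq
        · exact he
        · exfalso
          have hpos : 0 < (pvBLoop dim p m dim.toNat 1 0 0).1 := ((pvProc_one hdpos).1 hq.1).1
          have hfalse := hno _ hpos (by rw [hpn]; exact hq.2.1)
          have h1 : PySem.Int.mod dim (pvBLoop dim p m dim.toNat 1 0 0).1 = 0 :=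
            (PySem.Int.mod_eq_zero_iff_dvd dim _).2 ((pvProc_one hdpos).1 hq.1).2
          have h2 : m ≤ PySem.Int.floordiv dim (pvBLoop dim p m dim.toNat 1 0 0).1 := by
            rw [PySem.Int.floordiv_eq_ediv_of_pos hpos]; exact hq.2.2
          simp [h1, h2] at hfalse
      cases hA2 : pvALoop (fun h => PySem.Int.mod dim h == 0) p.toNat with
      | some k =>
        obtain ⟨hk0, hkle, hkQ, hkmax⟩ := pvALoop_some hA2
        rw [hpn] at hkle
        have hkdvd : k ∣ dim := (PySem.Int.mod_eq_zero_iff_dvd dim k).1 (by simpa using hkQ)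
        have hkr : k ≤ (pvBLoop dim p m dim.toNat 1 0 0).2 :=
          hanyC k ⟨(pvProc_one hdpos).2 ⟨hk0, hkdvd⟩, hkle⟩
        have hr2Q : pvProc dim 1 (pvBLoop dim p m dim.toNat 1 0 0).2 ∧
            (pvBLoop dim p m dim.toNat 1 0 0).2 ≤ p := by
          rcases hanyA with he | hq
          · exact absurd he (by omega)
          · exact hq
        have hnlt : ¬ k < (pvBLoop dim p m dim.toNat 1 0 0).2 := by
          intro hlt
          have hfalse := hkmax _ hlt (by rw [hpn]; exact hr2Q.2)
          have h1 : PySem.Int.mod dim (pvBLoop dim p m dim.toNat 1 0 0).2 = 0 :=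
            (PySem.Int.mod_eq_zero_iff_dvd dim _).2 ((pvProc_one hdpos).1 hr2Q.1).2
          simp [h1] at hfalse
        have heq : (pvBLoop dim p m dim.toNat 1 0 0).2 = k := by omega
        simp [hr1, heq]
      | none =>
        exfalso
        have hfalse := pvALoop_none hA2 1 (by omega) (by rw [hpn]; omega)
        simp at hfalse
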